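-- pv_equiv track=rewrite | github.com/hrx20000209/android_world | android_world/agents/mai_ui.py | _infer_app_from_goal
-- ===== SOURCE A (Python) =====
-- AVAILABLE_APPS = [
--     "Camera",
--     "Chrome",
--     "Clock",
--     "Contacts",
--     "Dialer",
--     "Files",
--     "Settings",
--     "Markor",
--     "Tasks",
--     "Simple Draw Pro",
--     "Simple Gallery Pro",
--     "Simple SMS Messenger",
--     "Audio Recorder",
--     "Pro Expense",
--     "Broccoli APP",
--     "OSMand",
--     "VLC",
--     "Joplin",
--     "Retro Music",
--     "OpenTracks",
--     "Simple Calendar Pro",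
-- ]
--
-- def _infer_app_from_goal(goal: str) -> str:
--     goal_text = str(goal or "").strip().lower()
--     if not goal_text:
--         return ""
--     alias_map = {
--         "audio recorder": "Audio Recorder",
--         "pro expense": "Pro Expense",
--         "simple gallery pro": "Simple Gallery Pro",
--         "simple gallery": "Simple Gallery Pro",
--         "simple calendar pro": "Simple Calendar Pro",
--         "simple calendar": "Simple Calendar Pro",
--         "broccoli": "Broccoli APP",
--         "joplin": "Joplin",
--         "markor": "Markor",
--         "tasks": "Tasks",
--         "chrome": "Chrome",
--         "camera": "Camera",
--         "files": "Files",
--         "settings": "Settings",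
--         "contacts": "Contacts",
--         "clock": "Clock",
--         "dialer": "Dialer",
--     }
--     for marker, app_name in alias_map.items():
--         if marker in goal_text:
--             return app_name
--     apps_sorted = sorted(AVAILABLE_APPS, key=lambda x: len(str(x)), reverse=True)
--     for app_name in apps_sorted:
--         app_text = str(app_name or "").strip()
--         if app_text and app_text.lower() in goal_text:
--             return app_text
--     return ""
-- ===== SOURCE B (Python) =====
-- AVAILABLE_APPS = [
--     "Camera",
--     "Chrome",
--     "Clock",
--     "Contacts",
--     "Dialer",
--     "Files",
--     "Settings",
--     "Markor",
--     "Tasks",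
--     "Simple Draw Pro",
--     "Simple Gallery Pro",
--     "Simple SMS Messenger",
--     "Audio Recorder",
--     "Pro Expense",
--     "Broccoli APP",
--     "OSMand",
--     "VLC",
--     "Joplin",
--     "Retro Music",
--     "OpenTracks",
--     "Simple Calendar Pro",
-- ]
--
-- _ALIASES = [
--     ("audio recorder", "Audio Recorder"),
--     ("pro expense", "Pro Expense"),
--     ("simple gallery pro", "Simple Gallery Pro"),
--     ("simple gallery", "Simple Gallery Pro"),
--     ("simple calendar pro", "Simple Calendar Pro"),
--     ("simple calendar", "Simple Calendar Pro"),
--     ("broccoli", "Broccoli APP"),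
--     ("joplin", "Joplin"),
--     ("markor", "Markor"),
--     ("tasks", "Tasks"),
--     ("chrome", "Chrome"),
--     ("camera", "Camera"),
--     ("files", "Files"),
--     ("settings", "Settings"),
--     ("contacts", "Contacts"),
--     ("clock", "Clock"),
--     ("dialer", "Dialer"),
-- ]
--
-- # Priority table: alias pairs first, then each available app (longest names
-- # first, stable) matched case-insensitively against itself.
-- _CANDIDATES = _ALIASES + [
--     (a.lower(), a) for a in sorted(AVAILABLE_APPS, key=len, reverse=True)
-- ]
--
--
-- def _first_at(text, j):
--     # Priority of the highest-priority candidate anchored at position j;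
--     # len(_CANDIDATES) if none starts here.
--     for k, (sub, _name) in enumerate(_CANDIDATES):
--         if text.startswith(sub, j):
--             return k
--     return len(_CANDIDATES)
--
--
-- def _infer_app_from_goal(goal: str) -> str:
--     # Scan the goal text position by position, keeping the best (smallest)
--     # priority of any candidate anchored at a position; instead of running a
--     # substring search per candidate, runs a prefix check per text position.
--     text = (goal or "").strip().lower()
--     if not text:
--         return ""
--     best = len(_CANDIDATES)
--     for j in range(len(text) + 1):
--         k = _first_at(text, j)
--         if k < best:
--             best = k
--     return _CANDIDATES[best][1] if best < len(_CANDIDATES) else ""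
-- ===== Notes on version B (the rewrite author's own statement) =====
-- stated objective: alternative
-- what changed: A runs a substring search over the goal text for each candidate (alias loop, then a per-call length-sorted app loop); B scans the goal text once position by position, taking at each position the first candidate from a precomputed priority table that prefix-matches there, and keeps the minimum-priority hit.
import Mathlib
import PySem

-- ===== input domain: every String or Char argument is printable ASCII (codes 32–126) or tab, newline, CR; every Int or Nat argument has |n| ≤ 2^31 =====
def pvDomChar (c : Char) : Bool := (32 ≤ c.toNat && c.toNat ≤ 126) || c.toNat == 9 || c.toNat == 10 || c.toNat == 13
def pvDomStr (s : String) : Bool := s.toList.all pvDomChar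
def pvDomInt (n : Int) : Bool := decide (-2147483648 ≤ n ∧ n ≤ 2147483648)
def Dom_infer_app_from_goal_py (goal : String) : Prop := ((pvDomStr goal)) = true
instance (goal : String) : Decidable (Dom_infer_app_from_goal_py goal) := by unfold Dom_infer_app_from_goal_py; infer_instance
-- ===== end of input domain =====

-- B replaces A's per-candidate substring searches (alias loop, then length-sorted app
-- loop) by a single left-to-right scan of the goal text keeping the minimal-priority
-- candidate anchored (prefix-matched) at each position; objective: alternative.

-- shared data (module-level constants in both Pythons)
def availableApps : List String :=
  ["Camera", "Chrome", "Clock", "Contacts", "Dialer", "Files", "Settings",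
   "Markor", "Tasks", "Simple Draw Pro", "Simple Gallery Pro",
   "Simple SMS Messenger", "Audio Recorder", "Pro Expense", "Broccoli APP",
   "OSMand", "VLC", "Joplin", "Retro Music", "OpenTracks", "Simple Calendar Pro"]

def aliasPairs : List (String × String) :=
  [("audio recorder", "Audio Recorder"),
   ("pro expense", "Pro Expense"),
   ("simple gallery pro", "Simple Gallery Pro"),
   ("simple gallery", "Simple Gallery Pro"),
   ("simple calendar pro", "Simple Calendar Pro"),
   ("simple calendar", "Simple Calendar Pro"),
   ("broccoli", "Broccoli APP"),
   ("joplin", "Joplin"),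
   ("markor", "Markor"),
   ("tasks", "Tasks"),
   ("chrome", "Chrome"),
   ("camera", "Camera"),
   ("files", "Files"),
   ("settings", "Settings"),
   ("contacts", "Contacts"),
   ("clock", "Clock"),
   ("dialer", "Dialer")]

-- sorted(AVAILABLE_APPS, key=len, reverse=True) — both Pythons compute exactly this
def sortedApps : List String :=
  PySem.List.sorted availableApps (fun a => PySem.Str.len a) true

-- ===== PORT A =====
-- for marker, app_name in alias_map.items(): if marker in goal_text: return app_name
def aAliasLoop : List (String × String) → String → Option String
  | [], _ => none
  | (marker, app_name) :: rest, goal_text =>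
      if PySem.Str.isIn marker goal_text then some app_name
      else aAliasLoop rest goal_text

-- for app_name in apps_sorted: app_text = str(app_name or "").strip();
--   if app_text and app_text.lower() in goal_text: return app_text
def aAppLoop : List String → String → Option String
  | [], _ => none
  | app_name :: rest, goal_text =>
      let app_text := PySem.Str.strip app_name
      if app_text ≠ "" ∧ PySem.Str.isIn (PySem.Str.lower app_text) goal_text then
        some app_text
      else aAppLoop rest goal_text

def infer_app_from_goal_py (goal : String) : String :=
  let goal_text := PySem.Str.lower (PySem.Str.strip goal)
  if goal_text = "" then ""
  else
    match aAliasLoop aliasPairs goal_text with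
    | some app_name => app_name
    | none =>
        match aAppLoop sortedApps goal_text with
        | some app_text => app_text
        | none => ""

-- ===== PORT B =====
-- _CANDIDATES = _ALIASES + [(a.lower(), a) for a in sorted(AVAILABLE_APPS, key=len, reverse=True)]
def bCandidates : List (String × String) :=
  aliasPairs ++ sortedApps.map (fun a => (PySem.Str.lower a, a))

-- text.startswith(sub, j): Python compares sub against the text from offset j on;
-- exact for 0 ≤ j (B only calls it with j from range(len(text)+1))
def pyStartswithFrom (text sub : String) (j : Int) : Bool :=
  PySem.Chars.startswith (text.toList.drop j.toNat) sub.toList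

-- def _first_at(text, j): for k, (sub, _name) in enumerate(_CANDIDATES):
--   if text.startswith(sub, j): return k;  return len(_CANDIDATES)
-- (the counter k runs over the enumeration; at the end it equals len(_CANDIDATES))
def bFirstAtAux : List (String × String) → String → Int → Nat → Nat
  | [], _, _, k => k
  | (sub, _name) :: rest, text, j, k =>
      if pyStartswithFrom text sub j then k else bFirstAtAux rest text j (k + 1)

def bFirstAt (text : String) (j : Int) : Nat := bFirstAtAux bCandidates text j 0

-- best = len(_CANDIDATES); for j in range(len(text)+1): k = _first_at(text[j:]);
--   if k < best: best = k
-- return _CANDIDATES[best][1] if best < len(_CANDIDATES) else ""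
def infer_app_from_goal_py_alt (goal : String) : String :=
  let text := PySem.Str.lower (PySem.Str.strip goal)
  if text = "" then ""
  else
    let best := (PySem.List.pyRange 0 (PySem.Str.len text + 1) 1).foldl
      (fun best j =>
        let k := bFirstAt text j
        if k < best then k else best)
      bCandidates.length
    if best < bCandidates.length then (PySem.List.pyGetD bCandidates (best : Int) ("", "")).2
    else ""

-- ===== PRECONDITION & SPEC =====
def Spec_infer_app_from_goal_py (goal : String) (out : String) : Prop := out = infer_app_from_goal_py_alt goal
instance (goal : String) (out : String) : Decidable (Spec_infer_app_from_goal_py goal out) := by unfold Spec_infer_app_from_goal_py; infer_instance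

-- ===== CLAIM (what is proved, stated in full; the proofs are below) =====
def Claim_equal_infer_app_from_goal_py : Prop := ∀ (goal : String), Dom_infer_app_from_goal_py goal → Spec_infer_app_from_goal_py goal (infer_app_from_goal_py goal)

-- ===== LEMMAS AND PROOFS =====

-- proof-side first-match loop over a (substring, name) table
def fmLoop : List (String × String) → String → String
  | [], _ => ""
  | (sub, name) :: rest, goal_text =>
      if PySem.Str.isIn sub goal_text then name else fmLoop rest goal_text

-- A's alias loop followed by a tail handler is fmLoop on the appended table
theorem fmLoop_append (xs ys : List (String × String)) (t : String) :
    fmLoop (xs ++ ys) t = (aAliasLoop xs t).getD (fmLoop ys t) := by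
  induction xs with
  | nil => rfl
  | cons p rest ih =>
      obtain ⟨m, a⟩ := p
      simp only [List.cons_append, fmLoop, aAliasLoop]
      split_ifs <;> simp [ih]

-- on names that survive strip and are nonempty, A's second loop is fmLoop of the mapped tail
theorem fmLoop_map (l : List String) (t : String)
    (h : ∀ a ∈ l, PySem.Str.strip a = a ∧ a ≠ "") :
    fmLoop (l.map (fun a => (PySem.Str.lower a, a))) t = (aAppLoop l t).getD "" := by
  induction l with
  | nil => rfl
  | cons a rest ih =>
      obtain ⟨hs, hne⟩ := h a (List.mem_cons_self ..)
      simp only [List.map_cons, fmLoop, aAppLoop, hs]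
      have hrest := ih (fun x hx => h x (List.mem_cons_of_mem _ hx))
      split_ifs with h1 h2 h2
      · rfl
      · exact absurd ⟨hne, h1⟩ h2
      · exact absurd h2.2 h1
      · exact hrest

theorem sortedApps_clean : ∀ a ∈ sortedApps, PySem.Str.strip a = a ∧ a ≠ "" := by
  decide

-- A is the first-match loop over the combined table
theorem a_eq_fmLoop (t : String) :
    (match aAliasLoop aliasPairs t with
     | some app_name => app_name
     | none =>
        match aAppLoop sortedApps t with
        | some app_text => app_text
        | none => "") = fmLoop bCandidates t := by
  rw [bCandidates, fmLoop_append, fmLoop_map sortedApps t sortedApps_clean]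
  cases aAliasLoop aliasPairs t with
  | some a => simp
  | none => cases aAppLoop sortedApps t <;> simp

-- fmLoop is the name at the first table index whose substring occurs
theorem fmLoop_eq_findIdx (cs : List (String × String)) (t : String) :
    fmLoop cs t =
      if h : List.findIdx (fun p => PySem.Str.isIn p.1 t) cs < cs.length
      then (cs[List.findIdx (fun p => PySem.Str.isIn p.1 t) cs]'h).2 else "" := by
  induction cs with
  | nil => rfl
  | cons p rest ih =>
      obtain ⟨sub, name⟩ := p
      simp only [fmLoop, List.findIdx_cons]
      by_cases hin : PySem.Str.isIn sub t = true
      · have hinC : PySem.Chars.isIn sub.toList t.toList = true := by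
          rw [← PySem.Str.isIn_eq]; exact hin
        simp [hinC]
      · rw [if_neg hin, ih]
        simp only [Bool.eq_false_iff.mpr hin, cond_false, List.length_cons]
        by_cases hlt : List.findIdx (fun p => PySem.Str.isIn p.1 t) rest < rest.length
        · rw [dif_pos hlt, dif_pos (by omega)]
          simp
        · rw [dif_neg hlt, dif_neg (by omega)]

-- B's inner loop is findIdx with an offset
theorem bFirstAtAux_eq (cs : List (String × String)) (s : String) (j : Int) (k : Nat) :
    bFirstAtAux cs s j k = k + List.findIdx (fun p => pyStartswithFrom s p.1 j) cs := by
  induction cs generalizing k with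
  | nil => simp [bFirstAtAux]
  | cons p rest ih =>
      obtain ⟨sub, name⟩ := p
      simp only [bFirstAtAux, List.findIdx_cons]
      by_cases h : pyStartswithFrom s sub j = true
      · rw [if_pos h, h]
        simp
      · rw [if_neg h, Bool.eq_false_iff.mpr h]
        simp only [cond_false, ih]
        omega

-- the first index of the table whose substring prefix-matches at position j
def fIdx (cs : List (String × String)) (t : String) (j : Nat) : Nat :=
  List.findIdx (fun p => PySem.Chars.startswith (t.toList.drop j) p.1.toList) cs

-- minimality of findIdx, used on both predicates
theorem findIdx_le_of_pred {α : Type} (p : α → Bool) (l : List α) (i : Nat)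
    (hi : i < l.length) (h : p (l[i]'hi) = true) : List.findIdx p l ≤ i := by
  by_contra hlt
  have h1 := List.not_of_lt_findIdx (p := p) (xs := l) (i := i) (by omega)
  have h2 : p (l[i]'hi) = false := h1
  rw [h] at h2
  exact Bool.true_eq_false.mp h2

-- minimum over all anchor positions of the first anchored candidate
-- = first candidate occurring as a substring
theorem min_fIdx_eq (cs : List (String × String)) (t : String) :
    ((List.range (t.toList.length + 1)).map (fIdx cs t)).foldl min cs.length
      = List.findIdx (fun p => PySem.Str.isIn p.1 t) cs := by
  set Pin := (fun p : String × String => PySem.Str.isIn p.1 t) with hPin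
  have hle := PySem.List.foldl_min_le
    ((List.range (t.toList.length + 1)).map (fIdx cs t)) cs.length
  have hmem := PySem.List.foldl_min_mem
    ((List.range (t.toList.length + 1)).map (fIdx cs t)) cs.length
  apply Nat.le_antisymm
  · -- M ≤ G
    by_cases hGlen : List.findIdx Pin cs < cs.length
    · have hin0 := @List.findIdx_getElem _ Pin cs hGlen
      have hin : PySem.Str.isIn ((cs[List.findIdx Pin cs]'hGlen).1) t = true := hin0
      rw [PySem.Str.isIn_eq, ← PySem.Chars.exists_prefix_drop_iff_isIn] at hin
      obtain ⟨j, hj⟩ := hin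
      -- move the anchor inside [0, length]
      have hj' : (cs[List.findIdx Pin cs]'hGlen).1.toList
          <+: t.toList.drop (min j t.toList.length) := by
        by_cases hjL : j ≤ t.toList.length
        · rw [Nat.min_eq_left hjL]
          exact hj
        · have hnil : t.toList.drop j = [] := List.drop_eq_nil_of_le (by omega)
          rw [hnil, List.prefix_nil] at hj
          simp [hj]
      have hF : fIdx cs t (min j t.toList.length) ≤ List.findIdx Pin cs := by
        apply findIdx_le_of_pred
          (fun p => PySem.Chars.startswith (t.toList.drop (min j t.toList.length)) p.1.toList)
          cs _ hGlen
        exact (PySem.Chars.startswith_iff _ _).mpr hj'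
      have hmem' : fIdx cs t (min j t.toList.length)
          ∈ (List.range (t.toList.length + 1)).map (fIdx cs t) :=
        List.mem_map.mpr ⟨min j t.toList.length, List.mem_range.mpr (by omega), rfl⟩
      exact le_trans (hle.2 _ hmem') hF
    · have hGeq : List.findIdx Pin cs = cs.length := by
        have := @List.findIdx_le_length _ Pin cs
        omega
      rw [hGeq]
      exact hle.1
  · -- G ≤ M
    rcases hmem with hN | hmem
    · rw [hN]
      exact List.findIdx_le_length
    · obtain ⟨j, _, hFj⟩ := List.mem_map.mp hmem
      rw [← hFj]
      by_cases hMlen : fIdx cs t j < cs.length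
      · -- the candidate anchored at j is a substring, so the global first index is ≤ it
        have hMlen' : List.findIdx
            (fun p => PySem.Chars.startswith (t.toList.drop j) p.1.toList) cs < cs.length :=
          hMlen
        have hpref0 := @List.findIdx_getElem _
          (fun p => PySem.Chars.startswith (t.toList.drop j) p.1.toList) cs hMlen'
        have hpref : PySem.Chars.startswith (t.toList.drop j)
            ((cs[fIdx cs t j]'hMlen).1.toList) = true := hpref0
        apply findIdx_le_of_pred Pin cs _ hMlen
        show PySem.Str.isIn ((cs[fIdx cs t j]'hMlen).1) t = true
        rw [PySem.Str.isIn_eq, ← PySem.Chars.exists_prefix_drop_iff_isIn]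
        exact ⟨j, (PySem.Chars.startswith_iff _ _).mp hpref⟩
      · have := @List.findIdx_le_length _ Pin cs
        unfold fIdx at hMlen ⊢
        omega

-- B's outer fold is exactly that minimum
theorem b_fold_eq (t : String) :
    (PySem.List.pyRange 0 (PySem.Str.len t + 1) 1).foldl
      (fun best j =>
        let k := bFirstAt t j
        if k < best then k else best)
      bCandidates.length
    = ((List.range (t.toList.length + 1)).map (fIdx bCandidates t)).foldl min
        bCandidates.length := by
  rw [PySem.Str.len_eq, PySem.List.pyRange_one]
  rw [show ((t.toList.length : Int) + 1 - 0).toNat = t.toList.length + 1 by omega]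
  rw [List.foldl_map, List.foldl_map]
  apply PySem.List.foldl_congr_mem
  intro acc k _
  have hb : bFirstAt t ((0 : Int) + (k : Int)) = fIdx bCandidates t k := by
    unfold bFirstAt fIdx
    rw [bFirstAtAux_eq, Nat.zero_add]
    congr 1
    funext p
    unfold pyStartswithFrom
    rw [show ((0 : Int) + (k : Int)).toNat = k by omega]
  show (if bFirstAt t ((0 : Int) + (k : Int)) < acc
        then bFirstAt t ((0 : Int) + (k : Int)) else acc)
      = min acc (fIdx bCandidates t k)
  rw [hb]
  rcases Nat.lt_or_ge (fIdx bCandidates t k) acc with h | h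
  · rw [if_pos h, Nat.min_eq_right (Nat.le_of_lt h)]
  · rw [if_neg (Nat.not_lt.mpr h), Nat.min_eq_left h]

-- ===== VERDICT (by name: the statement is the Claim_ definition above) =====
theorem infer_app_from_goal_py_spec : Claim_equal_infer_app_from_goal_py := by
  intro goal _
  unfold Spec_infer_app_from_goal_py infer_app_from_goal_py infer_app_from_goal_py_alt
  set t := PySem.Str.lower (PySem.Str.strip goal) with ht
  by_cases h0 : t = ""
  · simp [h0]
  · simp only [h0, if_false]
    rw [a_eq_fmLoop t, fmLoop_eq_findIdx, b_fold_eq, min_fIdx_eq]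
    by_cases h : List.findIdx (fun p => PySem.Str.isIn p.1 t) bCandidates < bCandidates.length
    · rw [dif_pos h, if_pos h, PySem.List.pyGetD_natCast, List.getD_eq_getElem _ _ h]
    · rw [dif_neg h, if_neg h]
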